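-- pv_equiv track=rewrite | github.com/xwxing1229/LeetCode | Python3/3546_equal_sum_grid_partition_i.py | canPartitionGrid
-- ===== SOURCE A (Python) =====
-- def canPartitionGrid(grid: list[list[int]]) -> bool:
--     def canPartition(grid):
--         m, n = len(grid), len(grid[0])
--         suffix = [0 for _ in range(m)]
--         tmp = 0
--         for i in range(m-1, 0, -1):
--             for j in range(n-1, -1, -1):
--                 tmp += grid[i][j]
--             suffix[i-1] = tmp
--
--         prefix = 0
--         for i in range(m):
--             for j in range(n):
--                 prefix += grid[i][j]
--             if prefix == suffix[i]:
--                 return True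
--         return False
--
--     m, n = len(grid), len(grid[0])
--     grid_T = [[0 for _ in range(m)] for _ in range(n)]
--     for i in range(m):
--         for j in range(n):
--             grid_T[j][i] = grid[i][j]
--
--     return canPartition(grid) or canPartition(grid_T)
-- ===== SOURCE B (Python) =====
-- def canPartitionGrid(grid: list[list[int]]) -> bool:
--     n = len(grid[0])
--
--     def splits(sums):
--         # every prefix sum, computed declaratively by slicing
--         return [sum(sums[:k + 1]) for k in range(len(sums))]
--
--     def ok(sums):
--         # a cut exists iff the total is even and half of it occurs as a prefix sum
--         total = sum(sums)
--         return total % 2 == 0 and total // 2 in splits(sums)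
--
--     row_sums = [sum(row[:n]) for row in grid]
--     col_sums = [sum(row[j] for row in grid) for j in range(n)]
--     return ok(row_sums) or ok(col_sums)
-- ===== Notes on version B (the rewrite author's own statement) =====
-- stated objective: alternative
-- what changed: B drops A's suffix table, explicit transpose and early-return prefix-vs-suffix scan: it reduces the question to 'the grand total is even and half of it occurs among the prefix sums of the line sums', testing membership of total//2 in the declaratively computed list of prefix sums, with column sums computed directly instead of transposing the matrix.
import Mathlib
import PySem

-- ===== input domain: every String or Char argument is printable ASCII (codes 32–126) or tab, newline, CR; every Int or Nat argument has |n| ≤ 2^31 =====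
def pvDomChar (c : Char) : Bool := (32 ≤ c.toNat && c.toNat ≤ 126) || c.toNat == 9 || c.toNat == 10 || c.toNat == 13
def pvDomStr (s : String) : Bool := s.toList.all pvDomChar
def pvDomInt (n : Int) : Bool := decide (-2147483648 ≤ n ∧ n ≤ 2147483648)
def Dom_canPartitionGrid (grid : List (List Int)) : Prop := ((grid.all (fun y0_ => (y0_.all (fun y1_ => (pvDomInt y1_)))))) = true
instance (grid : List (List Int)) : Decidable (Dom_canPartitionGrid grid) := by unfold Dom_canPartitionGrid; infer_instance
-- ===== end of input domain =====

-- B replaces A's suffix table, transpose and prefix-vs-suffix scan by a parity-and-membership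
-- test: a cut exists iff the total is even and total//2 occurs among the prefix sums.


-- ===== PORT A =====
-- 'for i in range(m): … if prefix == suffix[i]: return True' — early-return loop as structural
-- recursion over the index list, carrying prefix.
def aPrefLoop (g : List (List Int)) (suffix : List Int) (n : Int) :
    List Int → Int → Bool
  | [], _ => false
  | i :: rest, pre =>
      let pre' := (PySem.List.pyRange 0 n 1).foldl
        (fun t j => t + PySem.List.pyGetD (PySem.List.pyGetD g i []) j 0) pre
      if pre' = PySem.List.pyGetD suffix i 0 then true else aPrefLoop g suffix n rest pre'

-- inner helper 'canPartition(grid)'.  pyGetD/pySetD are exact in range; out-of-range indexing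
-- is an IndexError in Python, excluded by Pre_.
def aCanPartition (g : List (List Int)) : Bool :=
  let m : Int := g.length
  let n : Int := (g.headD []).length   -- len(grid[0]); IndexError on [] is excluded by Pre_
  let st :=
    (PySem.List.pyRange (m - 1) 0 (-1)).foldl
      (fun (st : List Int × Int) i =>
        let tmp := (PySem.List.pyRange (n - 1) (-1) (-1)).foldl
          (fun t j => t + PySem.List.pyGetD (PySem.List.pyGetD g i []) j 0) st.2
        (PySem.List.pySetD st.1 (i - 1) tmp, tmp))
      (List.replicate g.length (0 : Int), 0)
  aPrefLoop g st.1 n (PySem.List.pyRange 0 m 1) 0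

def canPartitionGrid (grid : List (List Int)) : Bool :=
  let m : Int := grid.length
  let n : Int := (grid.headD []).length   -- len(grid[0]); IndexError on [] is excluded by Pre_
  let gT :=
    (PySem.List.pyRange 0 m 1).foldl
      (fun gt i =>
        (PySem.List.pyRange 0 n 1).foldl
          (fun gt j =>
            PySem.List.pySetD gt j
              (PySem.List.pySetD (PySem.List.pyGetD gt j []) i
                (PySem.List.pyGetD (PySem.List.pyGetD grid i []) j 0)))
          gt)
      (List.replicate n.toNat (List.replicate grid.length (0 : Int)))
  aCanPartition grid || aCanPartition gT

-- ===== PORT B =====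
-- '[sum(sums[:k+1]) for k in range(len(sums))]'
def bSplits (sums : List Int) : List Int :=
  (PySem.List.pyRange 0 (sums.length : Int) 1).map
    (fun k => (PySem.List.slice sums none (some (k + 1))).sum)

-- 'total % 2 == 0 and total // 2 in splits(sums)'
def bOk (sums : List Int) : Bool :=
  let total := sums.sum
  decide (PySem.Int.mod total 2 = 0) && decide (PySem.Int.floordiv total 2 ∈ bSplits sums)

def canPartitionGrid_alt (grid : List (List Int)) : Bool :=
  let rowSums := grid.map (fun r => (PySem.List.slice r none (some ((grid.headD []).length : Int))).sum)
  let colSums := (PySem.List.pyRange 0 ((grid.headD []).length : Int) 1).map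
      (fun j => (grid.map (fun r => PySem.List.pyGetD r j 0)).sum)
  bOk rowSums || bOk colSums

-- ===== PRECONDITION & SPEC =====
-- Pre_ excludes exactly the inputs on which A raises: the empty grid (IndexError on
-- grid[0]) and grids with a row shorter than the first row (IndexError on grid[i][j]).
def Pre_canPartitionGrid (grid : List (List Int)) : Prop :=
  grid ≠ [] ∧ ∀ r ∈ grid, (grid.headD []).length ≤ r.length
instance (grid : List (List Int)) : Decidable (Pre_canPartitionGrid grid) := by
  unfold Pre_canPartitionGrid; infer_instance

def pvWitness_canPartitionGrid : List (List Int) := [[1, 2], [3, 0]]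

def Spec_canPartitionGrid (grid : List (List Int)) (out : Bool) : Prop := out = canPartitionGrid_alt grid
instance (grid : List (List Int)) (out : Bool) : Decidable (Spec_canPartitionGrid grid out) := by unfold Spec_canPartitionGrid; infer_instance

-- ===== CLAIM (what is proved, stated in full; the proofs are below) =====
def Claim_equal_canPartitionGrid : Prop := ∀ (grid : List (List Int)), Dom_canPartitionGrid grid → Pre_canPartitionGrid grid → Spec_canPartitionGrid grid (canPartitionGrid grid)

-- ===== LEMMAS AND PROOFS =====

-- the sum of the first nn entries of a line (both programs read a line only up to width nn)
def takeSum (nn : Nat) (r : List Int) : Int := (r.take nn).sum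

theorem sum_forward (nn : Nat) (r : List Int) (h : nn ≤ r.length) (t : Int) :
    (PySem.List.pyRange 0 (nn : Int) 1).foldl
      (fun t j => t + PySem.List.pyGetD r j 0) t = t + takeSum nn r := by
  have hlen : (((r.take nn).length : Nat) : Int) = (nn : Int) := by
    simp [List.length_take]; omega
  rw [show ((nn : Int)) = (((r.take nn).length : Nat) : Int) from hlen.symm]
  have hcongr : (PySem.List.pyRange 0 (((r.take nn).length : Nat) : Int) 1).foldl
        (fun t j => t + PySem.List.pyGetD r j 0) t
      = (PySem.List.pyRange 0 (((r.take nn).length : Nat) : Int) 1).foldl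
        (fun t j => t + PySem.List.pyGetD (r.take nn) j 0) t := by
    apply PySem.List.foldl_congr_mem
    intro a x hx
    rw [PySem.List.mem_pyRange_one] at hx
    rw [hlen] at hx
    congr 1
    rw [PySem.List.pyGetD_of_nonneg (h := hx.1), PySem.List.pyGetD_of_nonneg (h := hx.1),
      List.getD_eq_getElem?_getD, List.getD_eq_getElem?_getD, List.getElem?_take]
    rw [if_pos (by omega)]
  rw [hcongr, PySem.List.foldl_add, PySem.List.map_pyGetD_pyRange_zero']
  rfl

theorem sum_backward (nn : Nat) (r : List Int) (h : nn ≤ r.length) (t : Int) :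
    (PySem.List.pyRange ((nn : Int) - 1) (-1) (-1)).foldl
      (fun t j => t + PySem.List.pyGetD r j 0) t = t + takeSum nn r := by
  have hrev : PySem.List.pyRange ((nn : Int) - 1) (-1) (-1)
      = (PySem.List.pyRange 0 (nn : Int) 1).reverse := by
    rw [PySem.List.pyRange_neg_one_eq_reverse]; norm_num
  rw [hrev, PySem.List.foldl_add, List.map_reverse, List.sum_reverse, ← PySem.List.foldl_add]
  exact sum_forward nn r h t

-- sum of the lines strictly after line k, each read up to width nn
def sufAt (nn : Nat) (g : List (List Int)) (k : Nat) : Int :=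
  ((g.drop (k + 1)).map (takeSum nn)).sum

-- column j of g (as both programs read it)
def col (g : List (List Int)) (j : Nat) : List Int := g.map (fun r => r.getD j 0)

-- column j of the partially built transpose: first i entries filled in, rest still 0
def colPrefix (g : List (List Int)) (i j : Nat) : List Int :=
  (col g j).take i ++ List.replicate (g.length - i) 0

-- A's early-return scan over the line sums, abstracted (proof-only helper):
-- 'prefix += s; if prefix == total - prefix: True'
def runCheck (total : Int) : List Int → Int → Bool
  | [], _ => false
  | s :: rest, pre =>
      let pre' := pre + s
      if pre' = total - pre' then true else runCheck total rest pre'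

-- the prefix sums of l shifted by pre
def prefsFrom (pre : Int) : List Int → List Int
  | [] => []
  | s :: rest => (pre + s) :: prefsFrom (pre + s) rest

theorem runCheck_eq_any (total : Int) :
    ∀ (l : List Int) (pre : Int),
      runCheck total l pre = (prefsFrom pre l).any (fun p => decide (p = total - p)) := by
  intro l
  induction l with
  | nil => intro pre; rfl
  | cons s rest ih =>
      intro pre
      show (if pre + s = total - (pre + s) then true else runCheck total rest (pre + s)) = _
      rw [ih (pre + s)]
      show _ = ((pre + s) :: prefsFrom (pre + s) rest).any (fun p => decide (p = total - p))
      rw [List.any_cons]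
      by_cases h : pre + s = total - (pre + s)
      · rw [if_pos h, decide_eq_true h, Bool.true_or]
      · rw [if_neg h, decide_eq_false h, Bool.false_or]

theorem prefsFrom_eq (l : List Int) :
    ∀ (pre : Int),
      prefsFrom pre l = (List.range l.length).map (fun k => pre + (l.take (k + 1)).sum) := by
  induction l with
  | nil => intro pre; rfl
  | cons s rest ih =>
      intro pre
      show (pre + s) :: prefsFrom (pre + s) rest = _
      rw [ih (pre + s)]
      rw [List.length_cons, List.range_succ_eq_map, List.map_cons, List.map_map]
      congr 1
      · simp
      · apply List.map_congr_left
        intro k hk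
        simp [Function.comp]
        ring

theorem half_iff (total p : Int) :
    (p = total - p) ↔ (PySem.Int.mod total 2 = 0 ∧ p = PySem.Int.floordiv total 2) := by
  rw [PySem.Int.mod_eq_emod_of_pos (by norm_num : (0:Int) < 2),
    PySem.Int.floordiv_eq_ediv_of_pos (by norm_num : (0:Int) < 2)]
  omega

theorem bSplits_eq (sums : List Int) :
    bSplits sums = (List.range sums.length).map (fun k => (sums.take (k + 1)).sum) := by
  unfold bSplits
  rw [PySem.List.pyRange_one]
  simp only [Int.sub_zero, Int.toNat_natCast, List.map_map]
  apply List.map_congr_left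
  intro k hk
  simp only [Function.comp, Int.zero_add]
  rw [show ((k : Int) + 1) = (((k + 1 : Nat)) : Int) by push_cast; ring,
    PySem.List.slice_to_natCast]

theorem runCheck_eq_bOk (sums : List Int) :
    runCheck sums.sum sums 0 = bOk sums := by
  rw [runCheck_eq_any, prefsFrom_eq]
  unfold bOk
  rw [bSplits_eq]
  simp only [Int.zero_add]
  by_cases hm : PySem.Int.mod sums.sum 2 = 0
  · simp only [hm, decide_true, Bool.true_and]
    rw [Bool.eq_iff_iff, List.any_eq_true, decide_eq_true_iff]
    constructor
    · rintro ⟨p, hp, hq⟩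
      rw [decide_eq_true_iff] at hq
      exact ((half_iff _ _).mp hq).2 ▸ hp
    · intro hmem
      exact ⟨_, hmem, by rw [decide_eq_true_iff]; exact (half_iff _ _).mpr ⟨hm, rfl⟩⟩
  · simp only [hm, decide_false, Bool.false_and]
    rw [List.any_eq_false]
    intro p hp
    rw [decide_eq_true_iff]
    intro hq
    exact hm ((half_iff _ _).mp hq).1

theorem sufAt_succ (nn : Nat) (g : List (List Int)) (k : Nat) (hk : k + 1 < g.length) :
    sufAt nn g k = takeSum nn (g[k + 1]) + sufAt nn g (k + 1) := by
  unfold sufAt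
  rw [List.drop_eq_getElem_cons hk, List.map_cons, List.sum_cons]

theorem sufAt_last (nn : Nat) (g : List (List Int)) : sufAt nn g (g.length - 1) = 0 := by
  unfold sufAt
  rw [List.drop_eq_nil_of_le (by omega)]
  simp

theorem suffix_fold (g : List (List Int)) (nn : Nat)
    (hrect : ∀ i : Nat, (hi : i < g.length) → nn ≤ (g[i]'hi).length)
    (k : Nat) (hk : k < g.length) :
    ∀ (s : List Int), s.length = g.length →
      (PySem.List.pyRange (k : Int) 0 (-1)).foldl
        (fun (st : List Int × Int) i =>
          let tmp := (PySem.List.pyRange ((nn : Int) - 1) (-1) (-1)).foldl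
            (fun t j => t + PySem.List.pyGetD (PySem.List.pyGetD g i []) j 0) st.2
          (PySem.List.pySetD st.1 (i - 1) tmp, tmp))
        (s, sufAt nn g k)
      = (((List.range g.length).map fun p => if p < k then sufAt nn g p else s.getD p 0),
          sufAt nn g 0) := by
  induction k with
  | zero =>
      intro s hs
      rw [show ((0 : Nat) : Int) = 0 from rfl,
        PySem.List.pyRange_neg_one_eq_nil (a := 0) (b := 0) le_rfl]
      simp only [List.foldl_nil]
      congr 1
      apply List.ext_getElem (by simp [hs])
      intro p hp1 hp2
      have hp : p < s.length := hp1
      simp [List.getD_eq_getElem?_getD, List.getElem?_eq_getElem hp]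
  | succ k ih =>
      intro s hs
      rw [show ((k + 1 : Nat) : Int) = ((k : Int) + 1) by push_cast; ring]
      rw [PySem.List.pyRange_neg_one_cons (a := (k : Int) + 1) (b := 0) (by omega)]
      rw [List.foldl_cons]
      have hrow : PySem.List.pyGetD g ((k : Int) + 1) [] = g[k + 1]'hk := by
        rw [show ((k : Int) + 1) = ((k + 1 : Nat) : Int) by push_cast; ring]
        rw [PySem.List.pyGetD_natCast, List.getD_eq_getElem?_getD, List.getElem?_eq_getElem hk]
        rfl
      simp only [hrow]
      have hsum := sum_backward nn (g[k + 1]'hk) (hrect (k + 1) hk) (sufAt nn g (k + 1))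
      have hstep : sufAt nn g (k + 1) + takeSum nn (g[k + 1]'hk) = sufAt nn g k := by
        rw [sufAt_succ nn g k hk]; ring
      simp only [hsum, hstep]
      rw [show (k : Int) + 1 - 1 = ((k : Nat) : Int) by ring]
      rw [PySem.List.pySetD_natCast]
      have hih := ih (by omega) (s.set k (sufAt nn g k)) (by simp [hs])
      simp only [] at hih
      rw [hih]
      congr 1
      apply List.map_congr_left
      intro q hq
      simp only [List.mem_range] at hq
      have hks : k < s.length := by omega
      by_cases h1 : q < k
      · simp [h1, show q < k + 1 by omega]
      · by_cases h2 : q = k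
        · simp [h2, List.getD_eq_getElem?_getD, List.getElem?_set_self hks]
        · simp [h1, show ¬ q < k + 1 by omega, List.getD_eq_getElem?_getD,
            List.getElem?_set_ne (show k ≠ q from fun h => h2 h.symm)]

theorem pref_loop (g : List (List Int)) (suffix : List Int) (nn : Nat)
    (hrect : ∀ i : Nat, (hi : i < g.length) → nn ≤ (g[i]'hi).length)
    (hsuf : ∀ i : Nat, i < g.length → suffix.getD i 0 = sufAt nn g i) :
    ∀ (fuel d : Nat) (pre : Int), g.length = d + fuel →
      pre = ((g.map (takeSum nn)).take d).sum →
      aPrefLoop g suffix (nn : Int) (PySem.List.pyRange (d : Int) (g.length : Int) 1) pre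
        = runCheck (g.map (takeSum nn)).sum ((g.map (takeSum nn)).drop d) pre := by
  intro fuel
  induction fuel with
  | zero =>
      intro d pre hd hpre
      rw [PySem.List.pyRange_one_eq_nil (by omega), List.drop_eq_nil_of_le (by simp; omega)]
      rfl
  | succ fuel ih =>
      intro d pre hd hpre
      have hdm : d < g.length := by omega
      rw [PySem.List.pyRange_one_cons (by exact_mod_cast hdm)]
      have hrowA : PySem.List.pyGetD g ((d : Nat) : Int) [] = g[d]'hdm := by
        rw [PySem.List.pyGetD_natCast, List.getD_eq_getElem?_getD, List.getElem?_eq_getElem hdm]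
        rfl
      have hdrop : (g.map (takeSum nn)).drop d
          = takeSum nn (g[d]'hdm) :: (g.map (takeSum nn)).drop (d + 1) := by
        rw [List.drop_eq_getElem_cons (by simpa using hdm)]
        simp
      rw [hdrop]
      show (let pre' := (PySem.List.pyRange 0 (nn : Int) 1).foldl
              (fun t j => t + PySem.List.pyGetD (PySem.List.pyGetD g (d : Int) []) j 0) pre
            if pre' = PySem.List.pyGetD suffix (d : Int) 0 then true
            else aPrefLoop g suffix (nn : Int)
              (PySem.List.pyRange ((d : Int) + 1) (g.length : Int) 1) pre')
          = runCheck (g.map (takeSum nn)).sum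
              (takeSum nn (g[d]'hdm) :: (g.map (takeSum nn)).drop (d + 1)) pre
      have hsumf : (PySem.List.pyRange 0 (nn : Int) 1).foldl
          (fun t j => t + PySem.List.pyGetD (g[d]'hdm) j 0) pre = pre + takeSum nn (g[d]'hdm) :=
        sum_forward nn (g[d]'hdm) (hrect d hdm) pre
      have hpre' : pre + takeSum nn (g[d]'hdm) = ((g.map (takeSum nn)).take (d + 1)).sum := by
        rw [List.sum_take_succ _ _ (by simpa using hdm), ← hpre]
        simp
      have htot : (g.map (takeSum nn)).sum
          = ((g.map (takeSum nn)).take (d + 1)).sum + ((g.map (takeSum nn)).drop (d + 1)).sum := by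
        rw [← List.sum_append, List.take_append_drop]
      have hsufd : PySem.List.pyGetD suffix ((d : Nat) : Int) 0 = sufAt nn g d := by
        rw [PySem.List.pyGetD_natCast]; exact hsuf d hdm
      have hsufAt : sufAt nn g d = ((g.map (takeSum nn)).drop (d + 1)).sum := by
        unfold sufAt; rw [List.map_drop]
      simp only [hrowA, hsumf, hsufd]
      show (if pre + takeSum nn (g[d]'hdm) = sufAt nn g d then true
            else aPrefLoop g suffix (nn : Int)
              (PySem.List.pyRange ((d : Int) + 1) (g.length : Int) 1)
              (pre + takeSum nn (g[d]'hdm)))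
          = runCheck (g.map (takeSum nn)).sum
              (takeSum nn (g[d]'hdm) :: (g.map (takeSum nn)).drop (d + 1)) pre
      have hcond : (pre + takeSum nn (g[d]'hdm) = sufAt nn g d)
          ↔ (pre + takeSum nn (g[d]'hdm)
              = (g.map (takeSum nn)).sum - (pre + takeSum nn (g[d]'hdm))) := by
        rw [hsufAt, htot, hpre']
        constructor <;> intro h <;> omega
      by_cases hc : pre + takeSum nn (g[d]'hdm) = sufAt nn g d
      · rw [if_pos hc]
        show _ = (if pre + takeSum nn (g[d]'hdm)
            = (g.map (takeSum nn)).sum - (pre + takeSum nn (g[d]'hdm)) then true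
            else runCheck (g.map (takeSum nn)).sum ((g.map (takeSum nn)).drop (d + 1))
              (pre + takeSum nn (g[d]'hdm)))
        rw [if_pos (hcond.mp hc)]
      · rw [if_neg hc]
        show _ = (if pre + takeSum nn (g[d]'hdm)
            = (g.map (takeSum nn)).sum - (pre + takeSum nn (g[d]'hdm)) then true
            else runCheck (g.map (takeSum nn)).sum ((g.map (takeSum nn)).drop (d + 1))
              (pre + takeSum nn (g[d]'hdm)))
        rw [if_neg (fun h => hc (hcond.mpr h))]
        rw [show ((d : Int) + 1) = (((d + 1 : Nat)) : Int) by push_cast; ring]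
        exact ih (d + 1) (pre + takeSum nn (g[d]'hdm)) (by omega) hpre'

-- the inner canPartition agrees with B's check on the list of line sums
theorem main_lemma (h : List (List Int))
    (hrect : ∀ r ∈ h, (h.headD []).length ≤ r.length) :
    aCanPartition h = bOk (h.map (takeSum (h.headD []).length)) := by
  rcases h with _ | ⟨r0, rest⟩
  · rfl
  · set g : List (List Int) := r0 :: rest with hg
    set nn : Nat := (g.headD []).length with hnn
    have hrect' : ∀ i : Nat, (hi : i < g.length) → nn ≤ (g[i]'hi).length := by
      intro i hi
      exact hrect (g[i]'hi) (List.getElem_mem hi)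
    unfold aCanPartition
    simp only []
    have hm1 : ((g.length : Int) - 1) = (((g.length - 1 : Nat)) : Int) := by
      have : 1 ≤ g.length := by simp [hg]
      push_cast [this]; ring
    have hzero : (0 : Int) = sufAt nn g (g.length - 1) := (sufAt_last nn g).symm
    rw [hm1]
    rw [show (List.replicate g.length (0 : Int), (0 : Int))
        = (List.replicate g.length (0 : Int), sufAt nn g (g.length - 1)) by rw [← hzero]]
    rw [suffix_fold g nn hrect' (g.length - 1) (by simp [hg]) _ (by simp)]
    have hsuf : ∀ i : Nat, i < g.length →
        ((List.range g.length).map fun p =>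
          if p < g.length - 1 then sufAt nn g p
          else (List.replicate g.length (0 : Int)).getD p 0).getD i 0
        = sufAt nn g i := by
      intro i hi
      rw [List.getD_eq_getElem?_getD, List.getElem?_map, List.getElem?_range hi]
      simp only [Option.map_some, Option.getD_some]
      by_cases hlt : i < g.length - 1
      · rw [if_pos hlt]
      · rw [if_neg hlt]
        have : i = g.length - 1 := by omega
        rw [this, sufAt_last, List.getD_eq_getElem?_getD, List.getElem?_replicate]
        simp [show g.length - 1 < g.length by simp [hg]]
    have := pref_loop g _ nn hrect' hsuf g.length 0 0 (by omega) (by simp)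
    rw [show ((0 : Nat) : Int) = (0 : Int) from rfl] at this
    rw [this]
    simp only [List.drop_zero]
    exact runCheck_eq_bOk (g.map (takeSum nn))

theorem set_map_range {α : Type} (n c : Nat) (f : Nat → α) (v : α) (hc : c < n) :
    ((List.range n).map f).set c v
      = (List.range n).map (fun j => if j = c then v else f j) := by
  apply List.ext_getElem (by simp)
  intro p hp1 hp2
  simp only [List.length_set, List.length_map, List.length_range] at hp1
  by_cases h : p = c
  · subst h
    rw [List.getElem_set_self (by simpa using hp1)]
    simp
  · rw [List.getElem_set_ne (fun hh => h hh.symm)]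
    simp [h]

theorem length_colPrefix (g : List (List Int)) (i j : Nat) (hi : i ≤ g.length) :
    (colPrefix g i j).length = g.length := by
  simp [colPrefix, col]
  omega

theorem colPrefix_set (g : List (List Int)) (i c : Nat) (hi : i < g.length) :
    (colPrefix g i c).set i ((g[i]'hi).getD c 0) = colPrefix g (i + 1) c := by
  have hcl : (col g c).length = g.length := by simp [col]
  apply List.ext_getElem
  · rw [List.length_set, length_colPrefix g i c (by omega), length_colPrefix g (i+1) c (by omega)]
  intro p hp1 hp2
  rw [List.length_set, length_colPrefix g i c (by omega)] at hp1
  have hcolget : ∀ (q : Nat) (hq : q < g.length), (col g c)[q]'(by omega) = (g[q]'hq).getD c 0 := by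
    intro q hq
    simp [col]
  have htake : ∀ (k p : Nat) (hk : k ≤ g.length) (hp : p < g.length),
      (colPrefix g k c)[p]'(by rw [length_colPrefix g k c hk]; omega)
      = if p < k then (g[p]'hp).getD c 0 else 0 := by
    intro k p hk hp
    unfold colPrefix
    by_cases hlt : p < k
    · rw [List.getElem_append_left (by rw [List.length_take]; omega)]
      rw [List.getElem_take]
      rw [if_pos hlt]
      exact hcolget p hp
    · rw [List.getElem_append_right (by rw [List.length_take]; omega)]
      rw [if_neg hlt, List.getElem_replicate]
  by_cases h : p = i
  · subst h
    rw [List.getElem_set_self hp1]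
    rw [htake (p + 1) p (by omega) (by omega)]
    simp
  · rw [List.getElem_set_ne (fun hh => h hh.symm)]
    rw [htake i p (by omega) (by omega), htake (i+1) p (by omega) (by omega)]
    by_cases hlt : p < i
    · rw [if_pos hlt, if_pos (by omega)]
    · rw [if_neg hlt, if_neg (by omega)]

theorem transpose_inner (g : List (List Int)) (nn i : Nat) (hi : i < g.length) :
    ∀ (fuel c : Nat), nn = c + fuel →
      (PySem.List.pyRange (c : Int) (nn : Int) 1).foldl
        (fun gt j =>
          PySem.List.pySetD gt j
            (PySem.List.pySetD (PySem.List.pyGetD gt j []) (i : Int)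
              (PySem.List.pyGetD (PySem.List.pyGetD g (i : Int) []) j 0)))
        ((List.range nn).map fun j => if j < c then colPrefix g (i + 1) j else colPrefix g i j)
      = ((List.range nn).map (colPrefix g (i + 1))) := by
  intro fuel
  induction fuel with
  | zero =>
      intro c hc
      rw [PySem.List.pyRange_one_eq_nil (by omega), List.foldl_nil]
      apply List.map_congr_left
      intro j hj
      rw [if_pos (by simp at hj; omega)]
  | succ fuel ih =>
      intro c hc
      have hcn : c < nn := by omega
      rw [PySem.List.pyRange_one_cons (a := (c : Int)) (b := (nn : Int))
        (by exact_mod_cast hcn), List.foldl_cons]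
      have hrow : PySem.List.pyGetD g ((i : Nat) : Int) [] = g[i]'hi := by
        rw [PySem.List.pyGetD_natCast, List.getD_eq_getElem?_getD, List.getElem?_eq_getElem hi]
        rfl
      have hgt : PySem.List.pyGetD
          ((List.range nn).map fun j => if j < c then colPrefix g (i + 1) j else colPrefix g i j)
          ((c : Nat) : Int) [] = colPrefix g i c := by
        rw [PySem.List.pyGetD_natCast, List.getD_eq_getElem?_getD, List.getElem?_map,
          List.getElem?_range hcn]
        simp
      have hval : PySem.List.pySetD (colPrefix g i c) ((i : Nat) : Int)
          (PySem.List.pyGetD (PySem.List.pyGetD g ((i : Nat) : Int) []) ((c : Nat) : Int) 0)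
          = colPrefix g (i + 1) c := by
        rw [hrow]
        simp only [PySem.List.pyGetD_natCast, PySem.List.pySetD_natCast]
        exact colPrefix_set g i c hi
      rw [hgt, hval]
      have houter : PySem.List.pySetD
          ((List.range nn).map fun j => if j < c then colPrefix g (i + 1) j else colPrefix g i j)
          ((c : Nat) : Int) (colPrefix g (i + 1) c)
          = ((List.range nn).map fun j =>
              if j < c then colPrefix g (i + 1) j else colPrefix g i j).set c
              (colPrefix g (i + 1) c) := PySem.List.pySetD_natCast _ _ _
      rw [houter, set_map_range nn c _ _ hcn]
      rw [show ((List.range nn).map fun j =>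
            if j = c then colPrefix g (i + 1) c
            else if j < c then colPrefix g (i + 1) j else colPrefix g i j)
          = ((List.range nn).map fun j =>
            if j < c + 1 then colPrefix g (i + 1) j else colPrefix g i j) from by
        apply List.map_congr_left
        intro j hj
        by_cases h1 : j = c
        · rw [if_pos h1, if_pos (by omega), h1]
        · rw [if_neg h1]
          by_cases h2 : j < c
          · rw [if_pos h2, if_pos (by omega)]
          · rw [if_neg h2, if_neg (by omega)]]
      rw [show ((c : Int) + 1) = (((c + 1 : Nat)) : Int) by push_cast; ring]
      exact ih (c + 1) (by omega)

theorem transpose_outer (g : List (List Int)) (nn : Nat) :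
    ∀ (fuel i : Nat), g.length = i + fuel →
      (PySem.List.pyRange (i : Int) (g.length : Int) 1).foldl
        (fun gt i =>
          (PySem.List.pyRange 0 (nn : Int) 1).foldl
            (fun gt j =>
              PySem.List.pySetD gt j
                (PySem.List.pySetD (PySem.List.pyGetD gt j []) i
                  (PySem.List.pyGetD (PySem.List.pyGetD g i []) j 0)))
            gt)
        ((List.range nn).map (colPrefix g i))
      = ((List.range nn).map (col g)) := by
  intro fuel
  induction fuel with
  | zero =>
      intro i hi
      rw [PySem.List.pyRange_one_eq_nil (a := (i : Int)) (b := (g.length : Int)) (by omega),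
        List.foldl_nil]
      apply List.map_congr_left
      intro j hj
      unfold colPrefix
      have hgl : g.length = i := by omega
      rw [List.take_of_length_le (by simp [col]; omega), hgl]
      simp
  | succ fuel ih =>
      intro i hi
      have him : i < g.length := by omega
      rw [PySem.List.pyRange_one_cons (a := (i : Int)) (b := (g.length : Int))
        (by exact_mod_cast him), List.foldl_cons]
      have hstart : ((List.range nn).map (colPrefix g i))
          = ((List.range nn).map fun j =>
              if j < 0 then colPrefix g (i + 1) j else colPrefix g i j) := by
        apply List.map_congr_left; intro j hj; rw [if_neg (by omega)]
      have hin := transpose_inner g nn i him nn 0 (by omega)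
      simp only [Nat.cast_zero] at hin
      rw [hstart, hin]
      rw [show ((i : Int) + 1) = (((i + 1 : Nat)) : Int) by push_cast; ring]
      exact ih (i + 1) (by omega)

-- the fold in canPartitionGrid builds exactly the columns of g
theorem transpose_eq (g : List (List Int)) :
    (PySem.List.pyRange 0 (g.length : Int) 1).foldl
      (fun gt i =>
        (PySem.List.pyRange 0 (((g.headD []).length : Nat) : Int) 1).foldl
          (fun gt j =>
            PySem.List.pySetD gt j
              (PySem.List.pySetD (PySem.List.pyGetD gt j []) i
                (PySem.List.pyGetD (PySem.List.pyGetD g i []) j 0)))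
          gt)
      (List.replicate ((((g.headD []).length : Nat) : Int)).toNat
        (List.replicate g.length (0 : Int)))
    = ((List.range (g.headD []).length).map (col g)) := by
  set nn : Nat := (g.headD []).length with hnn
  have hstart : List.replicate ((nn : Int)).toNat (List.replicate g.length (0 : Int))
      = (List.range nn).map (colPrefix g 0) := by
    rw [Int.toNat_natCast]
    have : ∀ j ∈ List.range nn, colPrefix g 0 j = List.replicate g.length (0 : Int) := by
      intro j hj
      simp [colPrefix]
    rw [List.map_congr_left this, List.map_const', List.length_range]
  rw [hstart]
  have h := transpose_outer g nn g.length 0 (by omega)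
  simp only [Nat.cast_zero] at h
  exact h

theorem rect_transpose (g : List (List Int)) :
    ∀ r ∈ (List.range (g.headD []).length).map (col g),
      ((((List.range (g.headD []).length).map (col g)).headD []).length) ≤ r.length := by
  intro r hr
  simp only [List.mem_map] at hr
  obtain ⟨j, hj, rfl⟩ := hr
  simp only [List.mem_range] at hj
  obtain ⟨k, hk⟩ : ∃ k, (g.headD []).length = k + 1 := ⟨(g.headD []).length - 1, by omega⟩
  rw [hk, List.range_succ_eq_map]
  simp [col]

theorem map_sum_transpose (g : List (List Int)) :
    ((List.range (g.headD []).length).map (col g)).map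
        (takeSum ((((List.range (g.headD []).length).map (col g)).headD []).length))
      = (PySem.List.pyRange 0 (((g.headD []).length : Nat) : Int) 1).map
          (fun j => (g.map (fun r => PySem.List.pyGetD r j 0)).sum) := by
  set nn : Nat := (g.headD []).length with hnn
  by_cases hn0 : nn = 0
  · rw [hn0]
    rfl
  · have hhead : (((List.range nn).map (col g)).headD []) = col g 0 := by
      obtain ⟨k, hk⟩ : ∃ k, nn = k + 1 := ⟨nn - 1, by omega⟩
      rw [hk, List.range_succ_eq_map]
      rfl
    rw [hhead]
    rw [PySem.List.pyRange_one, List.map_map, List.map_map]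
    simp only [Int.sub_zero, Int.toNat_natCast]
    apply List.map_congr_left
    intro j hj
    simp only [Function.comp]
    have hcl : (col g 0).length = g.length := by simp [col]
    have : takeSum (col g 0).length (col g j) = (col g j).sum := by
      unfold takeSum
      rw [List.take_of_length_le (by simp [col])]
    rw [this]
    simp [col]

-- B's row sums are the width-nn line sums
theorem row_sums_eq (g : List (List Int)) :
    g.map (fun r => (PySem.List.slice r none (some ((g.headD []).length : Int))).sum)
      = g.map (takeSum (g.headD []).length) := by
  apply List.map_congr_left
  intro r hr
  rw [PySem.List.slice_to_natCast]
  rfl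

-- ===== VERDICT (by name: the statement is the Claim_ definition above) =====
theorem canPartitionGrid_spec : Claim_equal_canPartitionGrid := by
  unfold Claim_equal_canPartitionGrid
  intro grid _hdom hpre
  unfold Spec_canPartitionGrid canPartitionGrid canPartitionGrid_alt
  obtain ⟨hne, hrect⟩ := hpre
  simp only []
  rw [show ((grid.headD []).length : Int) = (((grid.headD []).length : Nat) : Int) from rfl]
  rw [transpose_eq grid]
  rw [row_sums_eq grid]
  rw [main_lemma grid hrect, main_lemma _ (rect_transpose grid)]
  rw [map_sum_transpose grid]
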